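-- pv_equiv track=rewrite | github.com/YingquanChen/Wenhua-Course-projects | Random-signal-processing/实验四/text_generator.py | buildWordDict
-- ===== SOURCE A (Python) =====
-- def buildWordDict(text):
--     # Remove newlines and quotes
--     text = text.replace('\n', ' ')
--     text = text.replace('"', '')
--
--     # Replace punctuation with space-padded versions
--     punctuation = [',', '.', ';', ':']
--     for symbol in punctuation:
--         text = text.replace(symbol, ' {} '.format(symbol))
--
--     words = text.split(' ')
--     # Filter out empty words
--     words = [word for word in words if word != '']
--
--     wordDict = {}
--     for i in range(1, len(words)):
--         if words[i-1] not in wordDict: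
--             wordDict[words[i-1]] = {}
--         if words[i] not in wordDict[words[i-1]]:
--             wordDict[words[i-1]][words[i]] = 0
--         if words[i-1] in punctuation:
--             wordDict[words[i-1]][words[i]] += 3  # Give punctuation weight 3
--         else:
--             wordDict[words[i-1]][words[i]] += 1
--     return wordDict
-- ===== SOURCE B (Python) =====
-- def buildWordDict(text):
--     # Same preprocessing as the original.
--     text = text.replace('\n', ' ')
--     text = text.replace('"', '')
--     punctuation = [',', '.', ';', ':']
--     for symbol in punctuation:
--         text = text.replace(symbol, ' {} '.format(symbol))
--     words = [word for word in text.split(' ') if word != '']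
--
--     # Pass 1: raw bigram counts, in encounter order.
--     counts = {}
--     for pair in zip(words, words[1:]):
--         counts[pair] = counts.get(pair, 0) + 1
--
--     # Pass 2: build the nested dict, weighting punctuation predecessors by 3.
--     wordDict = {}
--     for (prev, cur), n in counts.items():
--         if prev not in wordDict:
--             wordDict[prev] = {}
--         wordDict[prev][cur] = n * (3 if prev in punctuation else 1)
--     return wordDict
-- ===== Notes on version B (the rewrite author's own statement) =====
-- stated objective: alternative
-- what changed: A builds the nested dict in a single index loop with a conditional increment (+3/+1) per bigram; B first tallies raw bigram counts over zip(words, words[1:]) in one pass, then in a second pass transforms the tally into the nested dict, applying the punctuation weight by multiplication.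
import Mathlib
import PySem

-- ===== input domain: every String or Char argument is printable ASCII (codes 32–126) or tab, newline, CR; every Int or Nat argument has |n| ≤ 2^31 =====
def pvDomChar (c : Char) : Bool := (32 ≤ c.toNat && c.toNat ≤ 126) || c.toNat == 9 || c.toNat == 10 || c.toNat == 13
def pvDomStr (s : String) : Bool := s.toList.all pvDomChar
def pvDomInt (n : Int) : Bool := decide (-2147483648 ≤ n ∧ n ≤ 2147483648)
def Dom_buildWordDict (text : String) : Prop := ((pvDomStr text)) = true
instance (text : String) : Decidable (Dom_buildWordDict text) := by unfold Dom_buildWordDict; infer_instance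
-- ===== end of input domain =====

-- B replaces A's single conditional-increment loop over indices by a two-pass decomposition
-- (raw bigram counts over zip(words, words[1:]) in encounter order, then a transform pass
-- applying the punctuation weight); objective: alternative decomposition, same cost.

-- ===== PORT A =====
def pvPunct : List String := [",", ".", ";", ":"]

-- shared preprocessing (identical lines in A and B): replaces, punctuation padding, split, filter
def pvWords (text : String) : List String :=
  let t := PySem.Str.replace text "\n" " "
  let t := PySem.Str.replace t "\"" ""
  let t := pvPunct.foldl (fun t s => PySem.Str.replace t s (" " ++ s ++ " ")) t
  ((PySem.Str.split? t " ").getD []).filter (fun w => w ≠ "")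

-- the body of A's for-loop over i in range(1, len(words)) (p = (words[i-1], words[i]))
def pvStepA (wd : PySem.Dict String (PySem.Dict String Int)) (p : String × String) :
    PySem.Dict String (PySem.Dict String Int) :=
  let wd := if wd.contains p.1 then wd else wd.insert p.1 PySem.Dict.empty
  let inner := wd.getD p.1 PySem.Dict.empty
  let inner := if inner.contains p.2 then inner else inner.insert p.2 0
  let inner := if pvPunct.contains p.1 then inner.modify p.2 0 (· + 3)
               else inner.modify p.2 0 (· + 1)
  wd.insert p.1 inner

def buildWordDict (text : String) : List (String × List (String × Int)) :=
  let words := pvWords text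
  let wd := (PySem.List.pyRange 1 (words.length : Int)).foldl
    (fun wd i => pvStepA wd (PySem.List.pyGetD words (i - 1) "", PySem.List.pyGetD words i ""))
    PySem.Dict.empty
  wd.items.map (fun q => (q.1, q.2.items))

-- ===== PORT B =====
-- the body of B's second pass: ((prev, cur), n) ↦ set wordDict[prev][cur] = n * weight(prev)
def pvStepB (wd : PySem.Dict String (PySem.Dict String Int)) (e : (String × String) × Int) :
    PySem.Dict String (PySem.Dict String Int) :=
  let wd := if wd.contains e.1.1 then wd else wd.insert e.1.1 PySem.Dict.empty
  wd.insert e.1.1 ((wd.getD e.1.1 PySem.Dict.empty).insert e.1.2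
    (e.2 * (if pvPunct.contains e.1.1 then 3 else 1)))

def buildWordDict_alt (text : String) : List (String × List (String × Int)) :=
  let words := pvWords text
  let counts := (words.zip (PySem.List.slice words (some 1) none)).foldl
    (fun d p => d.insert p (d.getD p 0 + 1)) PySem.Dict.empty
  let wd := counts.items.foldl pvStepB PySem.Dict.empty
  wd.items.map (fun q => (q.1, q.2.items))

-- ===== PRECONDITION & SPEC =====
def Spec_buildWordDict (text : String) (out : List (String × List (String × Int))) : Prop := out = buildWordDict_alt text
instance (text : String) (out : List (String × List (String × Int))) : Decidable (Spec_buildWordDict text out) := by unfold Spec_buildWordDict; infer_instance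

-- ===== CLAIM (what is proved, stated in full; the proofs are below) =====
def Claim_equal_buildWordDict : Prop := ∀ (text : String), Dom_buildWordDict text → Spec_buildWordDict text (buildWordDict text)

-- ===== LEMMAS AND PROOFS =====

-- punctuation weight of a predecessor word
def pvW (prev : String) : Int := if pvPunct.contains prev then 3 else 1

-- closed form of A's nested dict after consuming the bigram list ps
def pvInner (ps : List (String × String)) (prev : String) : PySem.Dict String Int :=
  PySem.Dict.mk ((PySem.Set.ofList ((ps.filter (fun q => q.1 == prev)).map Prod.snd)).map
     (fun cur => (cur, (List.count (prev, cur) ps : Int) * pvW prev)))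

def pvOuter (ps : List (String × String)) : PySem.Dict String (PySem.Dict String Int) :=
  PySem.Dict.mk ((PySem.Set.ofList (ps.map Prod.fst)).map (fun prev => (prev, pvInner ps prev)))

-- closed form of B's second pass over an items list L with distinct keys
def pvOuterB (L : List ((String × String) × Int)) : PySem.Dict String (PySem.Dict String Int) :=
  PySem.Dict.mk ((PySem.Set.ofList (L.map (fun e => e.1.1))).map (fun prev =>
     (prev, PySem.Dict.mk ((L.filter (fun e => e.1.1 == prev)).map
        (fun e => (e.1.2, e.2 * pvW prev))))))

-- range(1, len) fold with xs[i-1], xs[i] = fold over the bigrams of xs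
theorem pv_foldRange_zip {α : Type} (g : α → (String × String) → α) (ws : List String) :
    ∀ (n k : Nat) (init : α), ws.length - k = n →
    (PySem.List.pyRange ((k : Int) + 1) (ws.length : Int)).foldl
      (fun acc i => g acc (PySem.List.pyGetD ws (i - 1) "", PySem.List.pyGetD ws i "")) init
    = (((ws.drop k)).zip ((ws.drop k)).tail).foldl g init := by
  intro n
  induction n with
  | zero =>
      intro k init h
      have hk : ws.length ≤ k := by omega
      rw [PySem.List.pyRange_one_eq_nil (by omega),
        List.drop_eq_nil_of_le hk]
      simp
  | succ n ih =>
      intro k init h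
      have hk : k < ws.length := by omega
      rcases lt_or_eq_of_le (Nat.succ_le_of_lt hk) with hk1 | hk1
      · rw [PySem.List.pyRange_one_cons (by omega), List.foldl_cons,
          show ((k : Int) + 1 - 1) = ((k : Nat) : Int) by ring,
          show ((k : Int) + 1) = (((k + 1 : Nat)) : Int) by push_cast; ring,
          PySem.List.pyGetD_natCast, PySem.List.pyGetD_natCast,
          ih (k + 1) _ (by omega),
          List.drop_eq_getElem_cons hk, List.tail_cons,
          List.drop_eq_getElem_cons hk1, List.zip_cons_cons, List.foldl_cons,
          List.tail_cons, ← List.drop_eq_getElem_cons hk1]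
        simp [hk, hk1]
      · rw [PySem.List.pyRange_one_eq_nil (by omega), List.foldl_nil]
        have : (ws.drop k).tail = [] := by
          rw [List.tail_drop]
          exact List.drop_eq_nil_of_le (by omega)
        rw [this, List.zip_nil_right, List.foldl_nil]

theorem pv_ofList_map_ofList {α β : Type} [BEq α] [LawfulBEq α] [BEq β] [LawfulBEq β]
    (f : α → β) (xs : List α) :
    PySem.Set.ofList ((PySem.Set.ofList xs).map f) = PySem.Set.ofList (xs.map f) := by
  induction xs using List.reverseRecOn with
  | nil => rfl
  | append_singleton xs x ih =>
      rw [PySem.Set.ofList_append_singleton, List.map_append, List.map_singleton,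
        PySem.Set.ofList_append_singleton]
      by_cases hx : x ∈ xs
      · rw [PySem.Set.add_of_mem (by simp [PySem.Set.mem_ofList, hx]), ih,
          PySem.Set.add_of_mem (by simp [PySem.Set.mem_ofList]; exact ⟨x, hx, rfl⟩)]
      · rw [PySem.Set.add_of_not_mem (by simp [PySem.Set.mem_ofList, hx]),
          List.map_append, List.map_singleton, PySem.Set.ofList_append_singleton, ih]

theorem pv_filter_snd (prev : String) (ps : List (String × String)) :
    ((PySem.Set.ofList ps).filter (fun q => q.1 == prev)).map Prod.snd
      = PySem.Set.ofList ((ps.filter (fun q => q.1 == prev)).map Prod.snd) := by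
  induction ps using List.reverseRecOn with
  | nil => rfl
  | append_singleton ps x ih =>
      rw [List.filter_append, PySem.Set.ofList_append_singleton]
      by_cases hx : x ∈ ps
      · rw [PySem.Set.add_of_mem (by simp [PySem.Set.mem_ofList, hx])]
        by_cases hpass : (x.1 == prev) = true
        · have hx2 : x.2 ∈ (ps.filter (fun q => q.1 == prev)).map Prod.snd :=
            List.mem_map_of_mem (List.mem_filter.mpr ⟨hx, hpass⟩)
          simp only [List.filter_cons, hpass, if_true, List.filter_nil, List.map_append,
            List.map_cons, List.map_nil, PySem.Set.ofList_append_singleton]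
          rw [PySem.Set.add_of_mem (by simp only [PySem.Set.mem_ofList]; exact hx2)]
          exact ih
        · simp only [List.filter_cons, hpass, if_false, Bool.false_eq_true, List.filter_nil,
            List.append_nil]
          exact ih
      · rw [PySem.Set.add_of_not_mem (by simp [PySem.Set.mem_ofList, hx]), List.filter_append]
        by_cases hpass : (x.1 == prev) = true
        · have hnot : x.2 ∉ (ps.filter (fun q => q.1 == prev)).map Prod.snd := by
            intro hmem
            obtain ⟨q, hq, hq2⟩ := List.mem_map.mp hmem
            obtain ⟨hqps, hq1⟩ := List.mem_filter.mp hq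
            have hqx : q = x := by
              rw [beq_iff_eq] at hq1 hpass
              exact Prod.ext_iff.mpr ⟨by rw [hq1, hpass], hq2⟩
            exact hx (hqx ▸ hqps)
          simp only [List.filter_cons, hpass, if_true, List.filter_nil, List.map_append,
            List.map_cons, List.map_nil, PySem.Set.ofList_append_singleton]
          rw [PySem.Set.add_of_not_mem (by simp only [PySem.Set.mem_ofList]; exact hnot), ih]
        · simp only [List.filter_cons, hpass, if_false, Bool.false_eq_true, List.filter_nil,
            List.append_nil]
          exact ih


theorem pv_keys_outer (ps : List (String × String)) :
    (pvOuter ps).keys = PySem.Set.ofList (ps.map Prod.fst) := by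
  simp [pvOuter, PySem.Dict.keys_mk, List.map_map, Function.comp_def]

theorem pv_contains_outer (ps : List (String × String)) (s : String) :
    (pvOuter ps).contains s = decide (s ∈ ps.map Prod.fst) := by
  rw [PySem.Dict.contains_eq_decide_mem_keys, pv_keys_outer]
  exact decide_eq_decide.mpr (PySem.Set.mem_ofList _ _)

theorem pv_nodup_keys_outer (ps : List (String × String)) : (pvOuter ps).keys.Nodup := by
  rw [pv_keys_outer]; exact PySem.Set.nodup_ofList _

theorem pv_getD_outer (ps : List (String × String)) {prev : String}
    (h : prev ∈ ps.map Prod.fst) :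
    (pvOuter ps).getD prev PySem.Dict.empty = pvInner ps prev :=
  PySem.Dict.getD_of_mem_items (pvOuter ps)
    (show (prev, pvInner ps prev) ∈ (pvOuter ps).items from
      List.mem_map.mpr ⟨prev, (PySem.Set.mem_ofList _ _).mpr h, rfl⟩)
    (pv_nodup_keys_outer ps) _

theorem pv_mem_filter_snd {prev cur : String} {ps : List (String × String)} :
    cur ∈ (ps.filter (fun q => q.1 == prev)).map Prod.snd ↔ (prev, cur) ∈ ps := by
  constructor
  · intro hmem
    obtain ⟨q, hq, hq2⟩ := List.mem_map.mp hmem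
    obtain ⟨hqps, hq1⟩ := List.mem_filter.mp hq
    rw [beq_iff_eq] at hq1
    rwa [show (prev, cur) = q from Prod.ext_iff.mpr ⟨hq1.symm, hq2.symm⟩]
  · intro h
    exact List.mem_map_of_mem (List.mem_filter.mpr ⟨h, by simp⟩)

theorem pv_keys_inner (ps : List (String × String)) (prev : String) :
    (pvInner ps prev).keys = PySem.Set.ofList ((ps.filter (fun q => q.1 == prev)).map Prod.snd) := by
  simp [pvInner, PySem.Dict.keys_mk, List.map_map, Function.comp_def]

theorem pv_nodup_keys_inner (ps : List (String × String)) (prev : String) :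
    (pvInner ps prev).keys.Nodup := by
  rw [pv_keys_inner]; exact PySem.Set.nodup_ofList _

theorem pv_contains_inner (ps : List (String × String)) (prev cur : String) :
    (pvInner ps prev).contains cur = decide ((prev, cur) ∈ ps) := by
  rw [PySem.Dict.contains_eq_decide_mem_keys, pv_keys_inner]
  simp [PySem.Set.mem_ofList, pv_mem_filter_snd]

theorem pv_getD_inner (ps : List (String × String)) {prev cur : String}
    (h : (prev, cur) ∈ ps) :
    (pvInner ps prev).getD cur 0 = (List.count (prev, cur) ps : Int) * pvW prev :=
  PySem.Dict.getD_of_mem_items (pvInner ps prev)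
    (show (cur, (List.count (prev, cur) ps : Int) * pvW prev) ∈ (pvInner ps prev).items from
      List.mem_map.mpr ⟨cur, (PySem.Set.mem_ofList _ _).mpr (pv_mem_filter_snd.mpr h), rfl⟩)
    (pv_nodup_keys_inner ps prev) _

-- the two weight branches of A's loop, as one insert
theorem pv_if_modify (d : PySem.Dict String Int) (prev cur : String) :
    (if pvPunct.contains prev then d.modify cur 0 (· + 3) else d.modify cur 0 (· + 1))
      = d.insert cur (d.getD cur 0 + pvW prev) := by
  unfold pvW; split_ifs <;> rfl

-- appending a bigram with a different first word leaves pvInner at prev unchanged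
theorem pv_inner_untouched (ps : List (String × String)) (p : String × String)
    {prev : String} (hne : prev ≠ p.1) : pvInner (ps ++ [p]) prev = pvInner ps prev := by
  unfold pvInner
  have hfilter : (ps ++ [p]).filter (fun q => q.1 == prev) = ps.filter (fun q => q.1 == prev) := by
    rw [List.filter_append, List.filter_cons, List.filter_nil]
    simp [beq_iff_eq, Ne.symm hne]
  rw [hfilter]
  congr 1
  apply List.map_congr_left
  intro cur _
  have hcnt : List.count (prev, cur) [p] = 0 :=
    List.count_eq_zero.mpr (by
      intro hmem; rw [List.mem_singleton] at hmem; exact hne (congrArg Prod.fst hmem))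
  rw [List.count_append, hcnt]; simp

-- appending (prev, cur) bumps only the (prev, cur) count
theorem pv_count_append_self (ps : List (String × String)) (prev cur : String) :
    List.count (prev, cur) (ps ++ [(prev, cur)]) = List.count (prev, cur) ps + 1 := by
  rw [List.count_append]; simp

theorem pv_count_append_other (ps : List (String × String)) {prev cur cur' : String}
    (hne : cur' ≠ cur) :
    List.count (prev, cur') (ps ++ [(prev, cur)]) = List.count (prev, cur') ps := by
  rw [List.count_append]
  have : List.count (prev, cur') [(prev, cur)] = 0 :=
    List.count_eq_zero.mpr (by
      intro hmem; rw [List.mem_singleton] at hmem; exact hne (congrArg Prod.snd hmem))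
  rw [this]; simp

theorem pv_stepA_closed (ps : List (String × String)) (p : String × String) :
    pvStepA (pvOuter ps) p = pvOuter (ps ++ [p]) := by
  obtain ⟨prev, cur⟩ := p
  simp only [pvStepA, pv_if_modify]
  by_cases hprev : prev ∈ ps.map Prod.fst
  · rw [pv_contains_outer]
    simp only [hprev, decide_true, if_true]
    rw [pv_getD_outer ps hprev, pv_contains_inner]
    by_cases hpair : (prev, cur) ∈ ps
    · simp only [hpair, decide_true, if_true]
      rw [pv_getD_inner ps hpair]
      apply PySem.Dict.ext
      rw [PySem.Dict.items_insert_of_contains _ _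
        (by rw [pv_contains_outer]; simpa using hprev)]
      show List.map _ ((PySem.Set.ofList (ps.map Prod.fst)).map _)
        = (PySem.Set.ofList ((ps ++ [(prev, cur)]).map Prod.fst)).map _
      rw [List.map_map,
        show (ps ++ [(prev, cur)]).map Prod.fst = ps.map Prod.fst ++ [prev] by simp,
        PySem.Set.ofList_append_singleton,
        PySem.Set.add_of_mem ((PySem.Set.mem_ofList _ _).mpr hprev)]
      apply List.map_congr_left
      intro pr hpr
      by_cases hpp : pr = prev
      · subst hpp
        simp only [Function.comp_apply, beq_self_eq_true, if_true]
        refine congrArg _ ?_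
        apply PySem.Dict.ext
        rw [PySem.Dict.items_insert_of_contains _ _
          (by rw [pv_contains_inner]; simpa using hpair)]
        show List.map _ ((PySem.Set.ofList ((ps.filter (fun q => q.1 == pr)).map Prod.snd)).map _)
          = (PySem.Set.ofList (((ps ++ [(pr, cur)]).filter (fun q => q.1 == pr)).map Prod.snd)).map _
        rw [List.map_map,
          show (ps ++ [(pr, cur)]).filter (fun q => q.1 == pr)
              = ps.filter (fun q => q.1 == pr) ++ [(pr, cur)] by
            rw [List.filter_append]; simp,
          List.map_append, List.map_singleton, PySem.Set.ofList_append_singleton,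
          PySem.Set.add_of_mem ((PySem.Set.mem_ofList _ _).mpr (pv_mem_filter_snd.mpr hpair))]
        apply List.map_congr_left
        intro c hc
        by_cases hcc : c = cur
        · subst hcc
          simp only [Function.comp_apply, beq_self_eq_true, if_true, pv_count_append_self]
          refine congrArg _ ?_
          push_cast
          ring
        · simp only [Function.comp_apply, beq_iff_eq, hcc, if_false,
            pv_count_append_other ps hcc]
      · simp only [Function.comp_apply, beq_iff_eq, hpp, if_false,
          pv_inner_untouched ps (prev, cur) hpp]
    · simp only [hpair, decide_false, Bool.false_eq_true, if_false]
      rw [PySem.Dict.getD_insert_self, PySem.Dict.insert_insert_self]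
      apply PySem.Dict.ext
      rw [PySem.Dict.items_insert_of_contains _ _
        (by rw [pv_contains_outer]; simpa using hprev)]
      show List.map _ ((PySem.Set.ofList (ps.map Prod.fst)).map _)
        = (PySem.Set.ofList ((ps ++ [(prev, cur)]).map Prod.fst)).map _
      rw [List.map_map,
        show (ps ++ [(prev, cur)]).map Prod.fst = ps.map Prod.fst ++ [prev] by simp,
        PySem.Set.ofList_append_singleton,
        PySem.Set.add_of_mem ((PySem.Set.mem_ofList _ _).mpr hprev)]
      apply List.map_congr_left
      intro pr hpr
      by_cases hpp : pr = prev
      · subst hpp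
        simp only [Function.comp_apply, beq_self_eq_true, if_true]
        refine congrArg _ ?_
        apply PySem.Dict.ext
        rw [PySem.Dict.items_insert_of_not_contains _ _
          (by rw [pv_contains_inner]; simpa using hpair)]
        show (pvInner ps pr).items ++ _
          = (PySem.Set.ofList (((ps ++ [(pr, cur)]).filter (fun q => q.1 == pr)).map Prod.snd)).map _
        rw [show (ps ++ [(pr, cur)]).filter (fun q => q.1 == pr)
              = ps.filter (fun q => q.1 == pr) ++ [(pr, cur)] by
            rw [List.filter_append]; simp,
          List.map_append, List.map_singleton, PySem.Set.ofList_append_singleton,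
          PySem.Set.add_of_not_mem (fun hmem =>
            hpair (pv_mem_filter_snd.mp ((PySem.Set.mem_ofList _ _).mp hmem))),
          List.map_append, List.map_singleton]
        refine congrArg₂ _ ?_ ?_
        · show (pvInner ps pr).items = _
          unfold pvInner
          apply List.map_congr_left
          intro c hc
          have hcc : c ≠ cur := fun h =>
            hpair (pv_mem_filter_snd.mp ((PySem.Set.mem_ofList _ _).mp (h ▸ hc)))
          rw [pv_count_append_other ps hcc]
        · have h0 : List.count (pr, cur) ps = 0 := List.count_eq_zero.mpr hpair
          rw [pv_count_append_self, h0]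
          norm_num
      · simp only [Function.comp_apply, beq_iff_eq, hpp, if_false,
          pv_inner_untouched ps (prev, cur) hpp]
  · have hcont : (pvOuter ps).contains prev = false := by
      rw [pv_contains_outer]; simpa using hprev
    rw [pv_contains_outer]
    simp only [hprev, decide_false, Bool.false_eq_true, if_false]
    rw [PySem.Dict.getD_insert_self, PySem.Dict.contains_empty]
    simp only [Bool.false_eq_true, if_false]
    rw [PySem.Dict.getD_insert_self, PySem.Dict.insert_insert_self,
      PySem.Dict.insert_insert_self]
    apply PySem.Dict.ext
    rw [PySem.Dict.items_insert_of_not_contains _ _ hcont]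
    show (pvOuter ps).items ++ _
      = (PySem.Set.ofList ((ps ++ [(prev, cur)]).map Prod.fst)).map _
    rw [show (ps ++ [(prev, cur)]).map Prod.fst = ps.map Prod.fst ++ [prev] by simp,
      PySem.Set.ofList_append_singleton,
      PySem.Set.add_of_not_mem (fun hmem => hprev ((PySem.Set.mem_ofList _ _).mp hmem)),
      List.map_append, List.map_singleton]
    refine congrArg₂ _ ?_ ?_
    · show (pvOuter ps).items = _
      unfold pvOuter
      apply List.map_congr_left
      intro pr hpr
      have hpp : pr ≠ prev := fun h =>
        hprev (h ▸ (PySem.Set.mem_ofList _ _).mp hpr)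
      rw [pv_inner_untouched ps (prev, cur) hpp]
    · refine congrArg (fun d => [(prev, d)]) ?_
      apply PySem.Dict.ext
      rw [PySem.Dict.items_insert_of_not_contains _ _ (PySem.Dict.contains_empty _)]
      have hfil : ps.filter (fun q => q.1 == prev) = [] := by
        apply List.filter_eq_nil_iff.mpr
        intro q hq
        simp only [beq_iff_eq]
        exact fun h => hprev (h ▸ List.mem_map_of_mem hq)
      show _ = (PySem.Set.ofList (((ps ++ [(prev, cur)]).filter (fun q => q.1 == prev)).map Prod.snd)).map _
      rw [show (ps ++ [(prev, cur)]).filter (fun q => q.1 == prev) = [(prev, cur)] by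
          rw [List.filter_append, hfil]; simp]
      have h0 : List.count (prev, cur) ps = 0 :=
        List.count_eq_zero.mpr (fun h => hprev (List.mem_map_of_mem h))
      simp [List.count_append, h0, PySem.Dict.empty, PySem.Set.ofList, PySem.Set.add]

theorem pv_foldA (ps : List (String × String)) :
    ps.foldl pvStepA PySem.Dict.empty = pvOuter ps := by
  induction ps using List.reverseRecOn with
  | nil => rfl
  | append_singleton ps p ih => rw [List.foldl_append, List.foldl_cons, List.foldl_nil, ih, pv_stepA_closed]

theorem pvB_keys (L : List ((String × String) × Int)) :
    (pvOuterB L).keys = PySem.Set.ofList (L.map (fun e => e.1.1)) := by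
  simp [pvOuterB, PySem.Dict.keys_mk, List.map_map, Function.comp_def]

theorem pvB_contains (L : List ((String × String) × Int)) (s : String) :
    (pvOuterB L).contains s = decide (s ∈ L.map (fun e => e.1.1)) := by
  rw [PySem.Dict.contains_eq_decide_mem_keys, pvB_keys]
  exact decide_eq_decide.mpr (PySem.Set.mem_ofList _ _)

theorem pvB_nodup_keys (L : List ((String × String) × Int)) : (pvOuterB L).keys.Nodup := by
  rw [pvB_keys]; exact PySem.Set.nodup_ofList _

theorem pvB_getD (L : List ((String × String) × Int)) {prev : String}
    (h : prev ∈ L.map (fun e => e.1.1)) :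
    (pvOuterB L).getD prev PySem.Dict.empty
      = PySem.Dict.mk ((L.filter (fun e => e.1.1 == prev)).map (fun e => (e.1.2, e.2 * pvW prev))) :=
  PySem.Dict.getD_of_mem_items (pvOuterB L)
    (show (prev, PySem.Dict.mk ((L.filter (fun e => e.1.1 == prev)).map
        (fun e => (e.1.2, e.2 * pvW prev)))) ∈ (pvOuterB L).items from
      List.mem_map.mpr ⟨prev, (PySem.Set.mem_ofList _ _).mpr h, rfl⟩)
    (pvB_nodup_keys L) _

theorem pvB_filter_untouched (L : List ((String × String) × Int)) (e : (String × String) × Int)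
    {pr : String} (hne : pr ≠ e.1.1) :
    (L ++ [e]).filter (fun q => q.1.1 == pr) = L.filter (fun q => q.1.1 == pr) := by
  rw [List.filter_append, List.filter_cons, List.filter_nil]
  simp [beq_iff_eq, Ne.symm hne]

theorem pv_stepB_closed (L : List ((String × String) × Int)) (e : (String × String) × Int)
    (he : e.1 ∉ L.map Prod.fst) :
    pvStepB (pvOuterB L) e = pvOuterB (L ++ [e]) := by
  obtain ⟨⟨p1, p2⟩, n⟩ := e
  simp only [pvStepB]
  rw [show (if pvPunct.contains p1 then (3 : Int) else 1) = pvW p1 from rfl]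
  by_cases h1 : p1 ∈ L.map (fun e => e.1.1)
  · rw [pvB_contains]
    simp only [h1, decide_true, if_true]
    rw [pvB_getD L h1]
    apply PySem.Dict.ext
    rw [PySem.Dict.items_insert_of_contains _ _ (by rw [pvB_contains]; simpa using h1)]
    show List.map _ ((PySem.Set.ofList (L.map (fun e => e.1.1))).map _)
      = (PySem.Set.ofList ((L ++ [((p1, p2), n)]).map (fun e => e.1.1))).map _
    rw [List.map_map,
      show (L ++ [((p1, p2), n)]).map (fun e => e.1.1) = L.map (fun e => e.1.1) ++ [p1] by simp,
      PySem.Set.ofList_append_singleton,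
      PySem.Set.add_of_mem ((PySem.Set.mem_ofList _ _).mpr h1)]
    apply List.map_congr_left
    intro pr hpr
    by_cases hpp : pr = p1
    · subst hpp
      simp only [Function.comp_apply, beq_self_eq_true, if_true]
      refine congrArg _ ?_
      apply PySem.Dict.ext
      have hp2 : PySem.Dict.contains (PySem.Dict.mk ((L.filter (fun e => e.1.1 == pr)).map
          (fun e => (e.1.2, e.2 * pvW pr)))) p2 = false := by
        rw [PySem.Dict.contains_mk]
        apply List.any_eq_false.mpr
        rintro ⟨c, v⟩ hq
        obtain ⟨q, hqf, hqe⟩ := List.mem_map.mp hq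
        obtain ⟨hqL, hq1⟩ := List.mem_filter.mp hqf
        simp only [beq_iff_eq] at hq1 ⊢
        intro hc
        apply he
        have : q.1 = (pr, p2) := Prod.ext_iff.mpr ⟨hq1, by
          have := congrArg Prod.fst hqe; simpa [hc] using this⟩
        have hm : q.1 ∈ L.map Prod.fst := List.mem_map_of_mem (f := Prod.fst) hqL
        exact this ▸ hm
      rw [PySem.Dict.items_insert_of_not_contains _ _ hp2]
      show _ ++ _ = ((L ++ [((pr, p2), n)]).filter (fun e => e.1.1 == pr)).map _
      rw [show (L ++ [((pr, p2), n)]).filter (fun e => e.1.1 == pr)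
            = L.filter (fun e => e.1.1 == pr) ++ [((pr, p2), n)] by
          rw [List.filter_append]; simp,
        List.map_append, List.map_singleton]
    · simp only [Function.comp_apply, beq_iff_eq, hpp, if_false]
      rw [pvB_filter_untouched L ((p1, p2), n) hpp]
  · have hcont : (pvOuterB L).contains p1 = false := by
      rw [pvB_contains]; simpa using h1
    rw [pvB_contains]
    simp only [h1, decide_false, Bool.false_eq_true, if_false]
    rw [PySem.Dict.getD_insert_self, PySem.Dict.insert_insert_self]
    apply PySem.Dict.ext
    rw [PySem.Dict.items_insert_of_not_contains _ _ hcont]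
    show (pvOuterB L).items ++ _
      = (PySem.Set.ofList ((L ++ [((p1, p2), n)]).map (fun e => e.1.1))).map _
    rw [show (L ++ [((p1, p2), n)]).map (fun e => e.1.1) = L.map (fun e => e.1.1) ++ [p1] by simp,
      PySem.Set.ofList_append_singleton,
      PySem.Set.add_of_not_mem (fun hmem => h1 ((PySem.Set.mem_ofList _ _).mp hmem)),
      List.map_append, List.map_singleton]
    refine congrArg₂ _ ?_ ?_
    · show (pvOuterB L).items = _
      unfold pvOuterB
      apply List.map_congr_left
      intro pr hpr
      have hpp : pr ≠ p1 := fun h => h1 (h ▸ (PySem.Set.mem_ofList _ _).mp hpr)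
      rw [pvB_filter_untouched L ((p1, p2), n) hpp]
    · refine congrArg (fun d => [(p1, d)]) ?_
      apply PySem.Dict.ext
      rw [PySem.Dict.items_insert_of_not_contains _ _ (PySem.Dict.contains_empty _)]
      have hfil : L.filter (fun q => q.1.1 == p1) = [] := by
        apply List.filter_eq_nil_iff.mpr
        intro q hq
        simp only [beq_iff_eq]
        exact fun h => h1 (h ▸ List.mem_map_of_mem hq)
      show _ = ((L ++ [((p1, p2), n)]).filter (fun q => q.1.1 == p1)).map _
      rw [show (L ++ [((p1, p2), n)]).filter (fun q => q.1.1 == p1) = [((p1, p2), n)] by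
          rw [List.filter_append, hfil]; simp]
      rfl

theorem pv_foldB (L : List ((String × String) × Int)) (h : (L.map Prod.fst).Nodup) :
    L.foldl pvStepB PySem.Dict.empty = pvOuterB L := by
  induction L using List.reverseRecOn with
  | nil => rfl
  | append_singleton L e ih =>
      rw [List.map_append] at h
      have h1 := h.of_append_left
      have h2 : e.1 ∉ L.map Prod.fst := by
        intro hm
        exact (List.disjoint_of_nodup_append h) hm (by simp)
      rw [List.foldl_append, List.foldl_cons, List.foldl_nil, ih h1, pv_stepB_closed L e h2]

theorem pv_translate (ps : List (String × String)) :
    pvOuterB ((PySem.Set.ofList ps).map (fun k => (k, (List.count k ps : Int)))) = pvOuter ps := by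
  apply PySem.Dict.ext
  unfold pvOuterB pvOuter
  show (PySem.Set.ofList _).map _ = (PySem.Set.ofList _).map _
  rw [List.map_map]
  have h1 : ((fun e : (String × String) × Int => e.1.1)
      ∘ (fun k : String × String => (k, (List.count k ps : Int)))) = Prod.fst := by
    funext k; rfl
  rw [h1, pv_ofList_map_ofList]
  apply List.map_congr_left
  intro prev _
  refine congrArg _ ?_
  apply PySem.Dict.ext
  show (((PySem.Set.ofList ps).map _).filter _).map _ = _
  rw [List.filter_map, List.map_map]
  unfold pvInner
  show _ = (PySem.Set.ofList ((ps.filter (fun q => q.1 == prev)).map Prod.snd)).map _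
  rw [← pv_filter_snd, List.map_map]
  apply List.map_congr_left
  intro k hk
  have hk1 : k.1 = prev := by
    have := (List.mem_filter.mp hk).2
    simpa [Function.comp] using this
  show (k.2, (List.count k ps : Int) * pvW prev) = (k.2, (List.count (prev, k.2) ps : Int) * pvW prev)
  rw [show (prev, k.2) = k from Prod.ext_iff.mpr ⟨hk1.symm, rfl⟩]

-- ===== VERDICT (by name: the statement is the Claim_ definition above) =====
theorem buildWordDict_spec : Claim_equal_buildWordDict := by
  intro text _
  show buildWordDict text = buildWordDict_alt text
  unfold buildWordDict buildWordDict_alt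
  simp only [PySem.List.slice_from_one]
  have hA := pv_foldRange_zip pvStepA (pvWords text) ((pvWords text).length) 0
    (PySem.Dict.empty) (by simp)
  have h1 : ((0 : Nat) : Int) + 1 = 1 := by norm_num
  rw [h1] at hA
  simp only [List.drop_zero] at hA
  rw [hA]
  rw [PySem.Dict.foldl_insert_getD_add_one_eq_counter, PySem.Dict.items_counter]
  rw [pv_foldA]
  rw [pv_foldB _ (by
    rw [List.map_map]
    have : (Prod.fst ∘ fun k => (k, (List.count k ((pvWords text).zip (pvWords text).tail) : Int)))
        = id := by funext k; rfl
    rw [this, List.map_id]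
    exact PySem.Set.nodup_ofList _)]
  rw [pv_translate]
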